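-- pv_equiv track=rewrite | github.com/PXLogic/PXView | libsigrokdecode/decoders/sent/crc4.py | crc4_infineon
-- ===== SOURCE A (Python) =====
-- def crc4_infineon(data):
--     '''
--     CRC4 implementation, Infineon style (as specified in TLE4998 user manual)
--     data should also include the status nibble
--     '''
--     assert type(data) == list, 'Data must be a list'
--     assert len(data) >= 1, 'Data must not be empty!'
--
--     crcTable = [0, 13, 7, 10, 14, 3, 9, 4, 1, 12, 6, 11, 15, 2, 8, 5]
--     checksum = 5
--     for d in data:
--         checksum = crcTable[checksum ^ d]
--
--     return checksum
-- ===== SOURCE B (Python) =====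
-- def crc4_infineon(data):
--     '''
--     CRC4 implementation, Infineon style (polynomial 0xD), computed
--     bitwise on the fly instead of via a precomputed table.
--     '''
--     assert type(data) == list, 'Data must be a list'
--     assert len(data) >= 1, 'Data must not be empty!'
--
--     checksum = 5
--     for d in data:
--         checksum ^= d
--         for _ in range(4):
--             if checksum & 8:
--                 checksum = ((checksum << 1) ^ 13) & 0xF
--             else:
--                 checksum = (checksum << 1) & 0xF
--     return checksum
-- ===== Notes on version B (the rewrite author's own statement) =====
-- stated objective: idiomatic
-- what changed: Replaced the precomputed 16-entry CRC lookup table with an on-the-fly bitwise CRC4 step (xor the nibble in, then four shift-and-conditionally-xor-0xD rounds masked to 4 bits).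
import Mathlib
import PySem

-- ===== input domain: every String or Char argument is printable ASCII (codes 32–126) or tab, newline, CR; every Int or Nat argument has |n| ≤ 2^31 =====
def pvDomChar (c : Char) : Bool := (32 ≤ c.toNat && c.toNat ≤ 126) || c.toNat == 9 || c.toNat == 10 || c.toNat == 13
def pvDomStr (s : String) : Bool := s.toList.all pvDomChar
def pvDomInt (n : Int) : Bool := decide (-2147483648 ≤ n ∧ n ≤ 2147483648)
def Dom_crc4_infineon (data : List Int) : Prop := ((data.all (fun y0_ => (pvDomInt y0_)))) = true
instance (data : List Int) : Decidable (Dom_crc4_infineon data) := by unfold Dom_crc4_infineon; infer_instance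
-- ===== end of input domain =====

-- B replaces A's precomputed 16-entry lookup table with an on-the-fly bitwise CRC
-- step (poly 0xD); objective: idiomatic/alternative, same cost.

-- ===== PORT A =====
-- A's table lookup crcTable[checksum ^ d]: PySem.List.pyGet? (Python negative
-- indexing, none = IndexError); inside Pre_ the lookup always succeeds, .getD 0
-- is never the default.
def pvCrcTable : List Int := [0, 13, 7, 10, 14, 3, 9, 4, 1, 12, 6, 11, 15, 2, 8, 5]

def crc4_infineon (data : List Int) : Int :=
  data.foldl (fun checksum d => (PySem.List.pyGet? pvCrcTable (PySem.Int.bxor checksum d)).getD 0) 5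

-- ===== PORT B =====
-- one data step of B: checksum ^= d, then 4 bitwise shift rounds
def pvCrcStep (checksum d : Int) : Int :=
  (List.range 4).foldl
    (fun c _ => if PySem.Int.band c 8 ≠ 0 then PySem.Int.band (PySem.Int.bxor (c <<< 1) 13) 15
                else PySem.Int.band (c <<< 1) 15)
    (PySem.Int.bxor checksum d)

def crc4_infineon_alt (data : List Int) : Int :=
  data.foldl pvCrcStep 5

-- ===== PRECONDITION & SPEC =====
-- Pre_ excludes the empty list (A's assert raises AssertionError) and lists with
-- an element below -16 or above 15, on which A's table lookup raises IndexError;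
-- A returns normally on all of Pre_.
def Pre_crc4_infineon (data : List Int) : Prop :=
  data ≠ [] ∧ ∀ d ∈ data, -16 ≤ d ∧ d ≤ 15
instance (data : List Int) : Decidable (Pre_crc4_infineon data) := by unfold Pre_crc4_infineon; infer_instance

def pvWitness_crc4_infineon : List Int := [3, 15, -7, 0]

def Spec_crc4_infineon (data : List Int) (out : Int) : Prop := out = crc4_infineon_alt data
instance (data : List Int) (out : Int) : Decidable (Spec_crc4_infineon data out) := by unfold Spec_crc4_infineon; infer_instance

-- ===== CLAIM =====
def Claim_equal_crc4_infineon : Prop := ∀ (data : List Int), Dom_crc4_infineon data → Pre_crc4_infineon data → Spec_crc4_infineon data (crc4_infineon data)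

-- ===== LEMMAS AND PROOFS =====
-- one CRC step: table lookup and bitwise rounds agree, result is a nibble
lemma pvStep_eq (c d : Int) (hc0 : 0 ≤ c) (hc : c ≤ 15) (hd0 : -16 ≤ d) (hd : d ≤ 15) :
    (PySem.List.pyGet? pvCrcTable (PySem.Int.bxor c d)).getD 0 = pvCrcStep c d ∧
    0 ≤ pvCrcStep c d ∧ pvCrcStep c d ≤ 15 := by
  interval_cases c <;> interval_cases d <;> exact ⟨by decide, by decide, by decide⟩

lemma pvFold_eq (data : List Int) (c : Int) (hc0 : 0 ≤ c) (hc : c ≤ 15)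
    (h : ∀ d ∈ data, -16 ≤ d ∧ d ≤ 15) :
    data.foldl (fun checksum d => (PySem.List.pyGet? pvCrcTable (PySem.Int.bxor checksum d)).getD 0) c
      = data.foldl pvCrcStep c := by
  induction data generalizing c with
  | nil => rfl
  | cons d rest ih =>
    have hd := h d (List.mem_cons_self ..)
    obtain ⟨he, h0, h15⟩ := pvStep_eq c d hc0 hc hd.1 hd.2
    simp only [List.foldl_cons, he]
    exact ih _ h0 h15 (fun x hx => h x (List.mem_cons_of_mem _ hx))

theorem crc4_infineon_spec : Claim_equal_crc4_infineon := by
  intro data _ hpre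
  unfold Spec_crc4_infineon crc4_infineon crc4_infineon_alt
  exact pvFold_eq data 5 (by norm_num) (by norm_num) hpre.2
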